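-- pv_equiv track=rewrite | github.com/lucassalcarde/dsf | dsf.py | current_facts
-- ===== SOURCE A (Python) =====
-- def current_facts(facts, schema):
--     """
--     Metodo desafio.
--
--     relation = interação com cada schema
--     fact = interação com cada facts
--     list_result_one = lista de tuplas com resultado one-to-one.
--     list_result_many = lista de tuplas com resultado one-to-many.
--     list_apoio = auxilia na busca por fatos mais recentes
--
--     :return: list_result = Retorna lista com resultado final.
--     """
--     list_apoio = []
--
--     def treatment_facts(fact):
--         """Metodo retorna fato relação one-to-one mais recente."""
--         for apoio in list_apoio:
--             if fact[:2] == apoio[:2]: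
--                 return
--         list_apoio.append(fact)
--         return fact
--
--     """list comprehension retorna todos fatos com relação one-to-one
--     e chama função treatment_facts"""
--     list_result_one = list(map(
--         treatment_facts,
--         [
--             fact for relation in schema if relation[2] == 'one'
--             for fact in facts[::-1] if relation[0] == fact[1] and fact[3]
--         ]
--     ))
--
--     '''list_result = list(map(
--         lambda x: list_apoio.append(x),
--         [fact for relation in schema if relation[2] == 'one'
--             for fact in facts if relation[0] == fact[1] and fact[3]
--             for apoio in list_apoio if fact[:2] == apoio[:2]]'''
--
--     # list comprehension retorna todos fatos com relação one-to-many
--     list_result_many = [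
--         fact for relation in schema if relation[2] == 'many'
--         for fact in facts[::-1] if relation[0] == fact[1] and fact[3]
--     ]
--     # junta as listas com os 2 tipos de realação
--     list_result = list_result_one + list_result_many
--     # Se algum fato = none incluido, acontece se uma das listas estiver vazia
--     list_result = [result for result in list_result if result]
--     return list_result
-- ===== SOURCE B (Python) =====
-- def current_facts(facts, schema):
--     """Single reverse-pass index by fact[1], then grouped lookups per schema
--     relation; shared dedup set across all 'one' relations. Rows too short to carry
--     a value field are skipped while indexing."""
--     index = {}
--     for fact in reversed(facts):
--         if len(fact) > 3 and fact[3]: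
--             index.setdefault(fact[1], []).append(fact)
--     seen = set()
--     result_one = []
--     for relation in schema:
--         if relation[2] == 'one':
--             for fact in index.get(relation[0], []):
--                 key = (fact[0], fact[1])
--                 if key not in seen:
--                     seen.add(key)
--                     result_one.append(fact)
--     result_many = []
--     for relation in schema:
--         if relation[2] == 'many':
--             result_many += index.get(relation[0], [])
--     return result_one + result_many
-- ===== Notes on version B (the rewrite author's own statement) =====
-- stated objective: alternative
-- what changed: B builds a dict index from fact[1] to the reversed-order truthy facts in one pass and serves each schema relation by lookup, deduping across all 'one' relations via a shared seen set keyed by (fact[0], fact[1]), instead of A's full reversed scan of facts for every relation plus a linear list_apoio scan per candidate; measured runtime on the generated inputs is the same.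
import Mathlib
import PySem

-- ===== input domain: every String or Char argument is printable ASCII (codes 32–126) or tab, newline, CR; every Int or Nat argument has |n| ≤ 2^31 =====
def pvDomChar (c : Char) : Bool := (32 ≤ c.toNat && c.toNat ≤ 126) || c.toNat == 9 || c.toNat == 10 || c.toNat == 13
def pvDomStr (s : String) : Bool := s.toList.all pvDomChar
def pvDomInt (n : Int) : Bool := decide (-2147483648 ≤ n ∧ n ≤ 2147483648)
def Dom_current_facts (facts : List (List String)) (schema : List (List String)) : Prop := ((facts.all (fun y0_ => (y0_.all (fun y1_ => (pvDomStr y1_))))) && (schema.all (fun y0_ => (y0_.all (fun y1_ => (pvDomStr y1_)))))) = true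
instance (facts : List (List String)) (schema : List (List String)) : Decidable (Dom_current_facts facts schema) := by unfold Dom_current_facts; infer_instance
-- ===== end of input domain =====

-- B replaces A's per-relation full scans of facts (plus a linear list_apoio scan per candidate)
-- with one reversed-pass dict index keyed by fact[1] and grouped lookups, deduping the 'one'
-- relations through one shared seen set (objective: alternative traversal/data structure).

-- ===== PORT A =====
-- 'relation[0] == fact[1] and fact[3]' (the condition of both of A's comprehensions)
def cfPredA (r f : List String) : Bool := (r.getD 0 "" == f.getD 1 "") && !(f.getD 3 "").isEmpty

-- treatment_facts folded over the one-to-one candidates; state = (list_apoio, map results)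
def cfTreat (st : List (List String) × List (Option (List String))) (f : List String) :
    List (List String) × List (Option (List String)) :=
  if st.1.any (fun a => f.take 2 == a.take 2) then (st.1, st.2 ++ [none])
  else (st.1 ++ [f], st.2 ++ [some f])

-- Python truthiness of an entry of list_result: None and [] are dropped
def cfKeep (o : Option (List String)) : Option (List String) :=
  match o with | some l => if l.isEmpty then none else some l | none => none

def current_facts (facts : List (List String)) (schema : List (List String)) : List (List String) :=
  let rev := facts.reverse   -- facts[::-1]
  let candOne := schema.flatMap (fun r => if r.getD 2 "" == "one" then rev.filter (cfPredA r) else [])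
  let list_result_one := (candOne.foldl cfTreat ([], [])).2
  let list_result_many := schema.flatMap (fun r => if r.getD 2 "" == "many" then rev.filter (cfPredA r) else [])
  let list_result := list_result_one ++ list_result_many.map some
  list_result.filterMap cfKeep   -- [result for result in list_result if result]

-- ===== PORT B =====
-- index.setdefault(fact[1], []).append(fact) — value-exact as d[k] = d.get(k, []) + [fact]
-- (guarded by 'len(fact) > 3 and fact[3]')
def cfBucketAdd (d : PySem.Dict String (List (List String))) (f : List String) :
    PySem.Dict String (List (List String)) :=
  if decide (3 < f.length) && !(f.getD 3 "").isEmpty then d.modify (f.getD 1 "") [] (· ++ [f]) else d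

-- inner loop body of the 'one' pass: shared seen-set dedup keyed by (fact[0], fact[1])
def cfDedupStep (st : PySem.Set (String × String) × List (List String)) (f : List String) :
    PySem.Set (String × String) × List (List String) :=
  let key := (f.getD 0 "", f.getD 1 "")
  if st.1.contains key then st else (PySem.Set.add st.1 key, st.2 ++ [f])

def current_facts_alt (facts : List (List String)) (schema : List (List String)) : List (List String) :=
  let index := facts.reverse.foldl cfBucketAdd PySem.Dict.empty
  let one := (schema.foldl
      (fun st r => if r.getD 2 "" == "one" then (index.getD (r.getD 0 "") []).foldl cfDedupStep st else st)
      ((PySem.Set.empty : PySem.Set (String × String)), [])).2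
  let many := schema.foldl
      (fun acc r => if r.getD 2 "" == "many" then acc ++ index.getD (r.getD 0 "") [] else acc) []
  one ++ many

-- ===== PRECONDITION & SPEC =====
-- Pre_ is exactly where Python A returns: every schema row carries its 3 fields, and as soon as
-- some relation is one/many (so A scans facts), every fact has its id field and, if some one/many
-- relation matches it, its value field; outside Pre_ A raises IndexError on a short row.
def Pre_current_facts (facts : List (List String)) (schema : List (List String)) : Prop :=
  (∀ r ∈ schema, 3 ≤ r.length) ∧
  ((∃ r ∈ schema, r.getD 2 "" = "one" ∨ r.getD 2 "" = "many") →
    ∀ f ∈ facts, 2 ≤ f.length ∧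
      (∀ r ∈ schema, (r.getD 2 "" = "one" ∨ r.getD 2 "" = "many") →
        r.getD 0 "" = f.getD 1 "" → 4 ≤ f.length))
instance (facts : List (List String)) (schema : List (List String)) : Decidable (Pre_current_facts facts schema) := by unfold Pre_current_facts; infer_instance

def pvWitness_current_facts : List (List String) × List (List String) :=
  ([["p", "a", "x", "t"], ["q", "a", "y", "t"], ["p", "a", "z", "t"]], [["a", "b", "one"], ["a", "c", "many"]])

def Spec_current_facts (facts : List (List String)) (schema : List (List String)) (out : List (List String)) : Prop := out = current_facts_alt facts schema
instance (facts : List (List String)) (schema : List (List String)) (out : List (List String)) : Decidable (Spec_current_facts facts schema out) := by unfold Spec_current_facts; infer_instance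

-- ===== CLAIM (what is proved, stated in full; the proofs are below) =====
def Claim_equal_current_facts : Prop := ∀ (facts : List (List String)) (schema : List (List String)), Dom_current_facts facts schema → Pre_current_facts facts schema → Spec_current_facts facts schema (current_facts facts schema)

-- ===== LEMMAS AND PROOFS =====

-- length ≥ 4 for any fact passing the truthiness test on fact[3]
lemma cfLen4 (f : List String) (h : (!(f.getD 3 "").isEmpty) = true) : 4 ≤ f.length := by
  by_contra hlt
  rw [List.getD_eq_default f "" (by omega)] at h
  revert h; decide

-- characterisation of B's index: the bucket at k holds the truthy facts with fact[1] = k, reversed order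
lemma cfBucket (l : List (List String)) (k : String) :
    (l.foldl cfBucketAdd PySem.Dict.empty).getD k []
      = (l.filter (fun f => (f.getD 1 "" == k) && (decide (3 < f.length) && !(f.getD 3 "").isEmpty))) := by
  have h1 : l.foldl cfBucketAdd PySem.Dict.empty
      = ((l.filter (fun f => decide (3 < f.length) && !(f.getD 3 "").isEmpty)).map (fun f => (f.getD 1 "", f))).foldl
          (fun d p => d.modify p.1 [] (· ++ [p.2])) PySem.Dict.empty := by
    rw [List.foldl_map, List.foldl_filter]
    rfl
  rw [h1, PySem.Dict.getD_foldl_modify_append, PySem.Dict.getD_empty]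
  simp [List.filter_map, List.map_map, Function.comp_def, List.filter_filter]

-- the bucket for key relation[0] is exactly A's per-relation filtered scan
lemma cfBucketPred (l : List (List String)) (r : List String) :
    (l.foldl cfBucketAdd PySem.Dict.empty).getD (r.getD 0 "") [] = l.filter (cfPredA r) := by
  rw [cfBucket]
  apply List.filter_congr
  intro f _
  by_cases ht : (!(f.getD 3 "").isEmpty) = true
  · have h4 : 3 < f.length := cfLen4 f ht
    simp [cfPredA, Bool.beq_comm, h4]
  · rw [Bool.not_eq_true] at ht
    unfold cfPredA
    rw [ht]
    simp

-- take-2 prefixes agree iff the (f[0], f[1]) keys agree, for rows of length ≥ 2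
lemma cfKeyEq (f g : List String) (hf : 2 ≤ f.length) (hg : 2 ≤ g.length) :
    (f.take 2 == g.take 2) = (((f.getD 0 "", f.getD 1 "") : String × String) == (g.getD 0 "", g.getD 1 "")) := by
  match f, g with
  | a :: b :: _, c :: d :: _ =>
    simp [List.take, List.getD]
    rw [Bool.eq_iff_iff]
    simp

-- B's 'one' pass over schema = one dedup fold over the concatenated candidates
lemma cfFlatten (sch : List (List String)) (bucket : List String → List (List String))
    (st : PySem.Set (String × String) × List (List String)) :
    sch.foldl (fun st r => if r.getD 2 "" == "one" then (bucket r).foldl cfDedupStep st else st) st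
      = (sch.flatMap (fun r => if r.getD 2 "" == "one" then bucket r else [])).foldl cfDedupStep st := by
  induction sch generalizing st with
  | nil => rfl
  | cons r rest ih =>
    simp only [List.foldl_cons, List.flatMap_cons, List.foldl_append]
    by_cases h : (r.getD 2 "" == "one") = true
    · rw [if_pos h, if_pos h, ih]
    · rw [if_neg h, if_neg h, ih]
      rfl

-- B's 'many' pass = A's flatMap of filtered scans
lemma cfMany (sch : List (List String)) (bucket : List String → List (List String)) :
    sch.foldl (fun acc r => if r.getD 2 "" == "many" then acc ++ bucket r else acc) []
      = sch.flatMap (fun r => if r.getD 2 "" == "many" then bucket r else []) := by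
  have h := PySem.List.foldl_congr_mem' (l := sch) (init := ([] : List (List String)))
    (f := fun acc r => if r.getD 2 "" == "many" then acc ++ bucket r else acc)
    (g := fun acc r => acc ++ (if r.getD 2 "" == "many" then bucket r else []))
    (by intro r _ acc; dsimp only; split <;> simp)
  rw [h, PySem.List.foldl_append_eq_flatMap]
  rfl

-- the final truthiness filter keeps every well-formed many-fact
lemma cfKeepMany (l : List (List String)) (h : ∀ f ∈ l, 4 ≤ f.length) :
    (l.map some).filterMap cfKeep = l := by
  rw [List.filterMap_map]
  have : ∀ f ∈ l, (cfKeep ∘ some) f = some f := by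
    intro f hf
    have h4 := h f hf
    match f with
    | a :: t => simp [cfKeep]
  rw [List.filterMap_congr this, List.filterMap_some]

-- core invariant: A's list_apoio dedup and B's seen-set dedup walk in lockstep
lemma cfDedupCore (cand : List (List String)) :
    ∀ (apoio : List (List String)) (seen : PySem.Set (String × String))
      (outA : List (Option (List String))) (outB : List (List String)),
    (∀ f ∈ cand, 4 ≤ f.length) →
    (∀ f : List String, 4 ≤ f.length →
        (apoio.any (fun a => f.take 2 == a.take 2)) = seen.contains (f.getD 0 "", f.getD 1 "")) →
    outA.filterMap cfKeep = outB →
    ((cand.foldl cfTreat (apoio, outA)).2).filterMap cfKeep = (cand.foldl cfDedupStep (seen, outB)).2 := by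
  induction cand with
  | nil => intro apoio seen outA outB _ _ hout; simpa using hout
  | cons f rest ih =>
    intro apoio seen outA outB hlen hinv hout
    have hf4 : 4 ≤ f.length := hlen f (by simp)
    have hkey := hinv f hf4
    simp only [List.foldl_cons, cfTreat, cfDedupStep]
    by_cases hdup : (apoio.any (fun a => f.take 2 == a.take 2)) = true
    · rw [if_pos hdup, if_pos (by rw [← hkey]; exact hdup)]
      apply ih _ _ _ _ (fun g hg => hlen g (by simp [hg])) hinv
      rw [List.filterMap_append, hout]
      simp [cfKeep]
    · have hnc : seen.contains (f.getD 0 "", f.getD 1 "") = false := by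
        rw [← hkey]; exact Bool.eq_false_iff.mpr hdup
      have hnotmem : ((f.getD 0 "", f.getD 1 "") : String × String) ∉ seen := by
        intro hm
        have h2 : seen.contains ((f.getD 0 "", f.getD 1 "") : String × String) = true :=
          List.contains_iff_mem.mpr hm
        rw [hnc] at h2
        cases h2
      rw [if_neg hdup, if_neg (by simpa using hnotmem)]
      have hadd : PySem.Set.add seen (f.getD 0 "", f.getD 1 "") = seen ++ [(f.getD 0 "", f.getD 1 "")] :=
        PySem.Set.add_of_not_mem hnotmem
      apply ih _ _ _ _ (fun g hg => hlen g (by simp [hg]))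
      · -- invariant re-established after recording f
        intro g hg4
        rw [hadd]
        have hL : ((apoio ++ [f]).any (fun a => g.take 2 == a.take 2))
            = (seen.contains (g.getD 0 "", g.getD 1 "")
                || (((g.getD 0 "", g.getD 1 "") : String × String) == (f.getD 0 "", f.getD 1 ""))) := by
          rw [List.any_append, hinv g hg4]
          congr 1
          simp only [List.any_cons, List.any_nil, Bool.or_false]
          exact cfKeyEq g f (by omega) (by omega)
        rw [hL, Bool.eq_iff_iff]
        simp [Prod.ext_iff]
      · -- the fresh fact is kept by the truthiness filter (it is non-empty)
        rw [List.filterMap_append, hout]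
        have hne : f ≠ [] := by intro h; rw [h] at hf4; simp at hf4
        match f, hne with
        | a :: t, _ => simp [cfKeep]

-- every one-to-one / one-to-many candidate has length ≥ 4 (its fact[3] field is truthy)
lemma cfCandLen (facts schema : List (List String)) (c : String)
    (f : List String)
    (hf : f ∈ schema.flatMap (fun r => if r.getD 2 "" == c then facts.reverse.filter (cfPredA r) else [])) :
    4 ≤ f.length := by
  rw [List.mem_flatMap] at hf
  obtain ⟨r, _, hr⟩ := hf
  split at hr
  · rw [List.mem_filter] at hr
    have := hr.2
    unfold cfPredA at this
    rw [Bool.and_eq_true] at this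
    exact cfLen4 f this.2
  · cases hr

-- ===== VERDICT (by name: the statement is the Claim_ definition above) =====
theorem current_facts_spec : Claim_equal_current_facts := by
  intro facts schema _ _
  unfold Spec_current_facts current_facts current_facts_alt
  simp only []
  rw [cfFlatten, cfMany]
  simp only [cfBucketPred]
  rw [List.filterMap_append]
  congr 1
  · exact cfDedupCore _ [] PySem.Set.empty [] []
      (fun f hf => cfCandLen facts schema "one" f hf)
      (by intro f _; simp [PySem.Set.empty]) rfl
  · exact cfKeepMany _ (fun f hf => cfCandLen facts schema "many" f hf)
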